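-- pv_equiv track=rewrite | github.com/sr-cheese/adventofcode | 2024/5/part_2.py | array_search
-- ===== SOURCE A (Python) =====
-- def get_rules(page, orders) :
--     return [ order for order in orders if str(page) in order ]
--
-- def check_rules(this_page, other_page, pages, rules) :
--     index_diff = pages.index(str(other_page)) - pages.index(str(this_page))
--     return [ rule.index(str(this_page)) == 0 and index_diff > 0 for rule in rules if str(this_page) in rule and str(other_page) in rule ][0]
--
-- def array_search(search_list, orders) :
--     rules = get_rules(search_list[0], orders)
--
--     if len(search_list) == 1 :
--         return True
--
--     check_results = [ check_rules(search_list[0], other_page, search_list, rules) for other_page in search_list[1:] ]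
--
--     if False in check_results :
--         return False
--
--     return array_search(search_list[1:], orders)
-- ===== SOURCE B (Python) =====
-- def array_search(search_list, orders):
--     n = len(search_list)
--     for i in range(n - 1):
--         this = str(search_list[i])
--         tail = search_list[i:]
--         for other in tail[1:]:
--             other = str(other)
--             rule = next(r for r in orders if this in r and other in r)
--             if not (rule.index(this) == 0 and tail.index(other) > tail.index(this)):
--                 return False
--     return True
-- ===== Notes on version B (the rewrite author's own statement) =====
-- stated objective: faster
-- what changed: Replaced A's recursion over suffixes with helper functions and full-round list comprehensions by one flat nested loop over index pairs that returns False at the first failed check, finding the first common order inline with next() instead of pre-filtering a rules list per round.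
import Mathlib
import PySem

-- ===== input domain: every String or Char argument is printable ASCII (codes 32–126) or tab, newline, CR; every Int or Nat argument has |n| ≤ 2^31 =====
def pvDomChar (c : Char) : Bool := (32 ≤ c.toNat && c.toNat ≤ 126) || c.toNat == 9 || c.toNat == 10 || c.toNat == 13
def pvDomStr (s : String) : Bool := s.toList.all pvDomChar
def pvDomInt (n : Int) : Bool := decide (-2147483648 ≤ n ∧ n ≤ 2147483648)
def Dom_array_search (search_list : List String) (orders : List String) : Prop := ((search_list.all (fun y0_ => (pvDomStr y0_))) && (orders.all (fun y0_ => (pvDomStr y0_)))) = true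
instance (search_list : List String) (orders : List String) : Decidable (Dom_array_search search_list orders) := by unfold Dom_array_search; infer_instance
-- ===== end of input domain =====

-- B replaces A's recursion with comprehension helpers by one flat early-exit nested loop over index pairs (simpler decomposition, same results).


-- ===== PORT A =====
-- get_rules(page, orders)
def getRulesA (page : String) (orders : List String) : List String :=
  orders.filter (fun order => PySem.Str.isIn page order)

-- check_rules(this_page, other_page, pages, rules); none = the IndexError of '[...][0]' on an empty
-- comprehension (the ValueError of pages.index is unreachable here: both pages are members of pages)
def checkRulesA (this other : String) (pages rules : List String) : Option Bool :=
  match PySem.List.index? pages other, PySem.List.index? pages this with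
  | some io, some it =>
      ((rules.filter (fun rule => PySem.Str.isIn this rule && PySem.Str.isIn other rule)).map
        (fun rule => (PySem.Str.find rule this == 0) && decide ((0:Int) < (io : Int) - (it : Int)))).head?
  | _, _ => none

-- array_search(search_list, orders): none = an exception (search_list[0] on [], or a raising check)
def arrayA (orders : List String) : List String → Option Bool
  | [] => none
  | p :: rest =>
      let rules := getRulesA p orders
      if rest.isEmpty then some true
      else
        let results := rest.map (fun o => checkRulesA p o (p :: rest) rules)
        if results.any (·.isNone) then none
        else if results.contains (some false) then some false
        else arrayA orders rest

def array_search (search_list : List String) (orders : List String) : Bool :=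
  (arrayA orders search_list).getD false

-- ===== PORT B =====
-- inner loop 'for other in tail[1:]': none = the StopIteration of next(...) on a pair with no
-- common order (the .index calls cannot fail: this and other are members of tail)
def innerB (orders : List String) (this : String) (tail : List String) : List String → Option Bool
  | [] => some true
  | other :: more =>
      match orders.find? (fun r => PySem.Str.isIn this r && PySem.Str.isIn other r) with
      | none => none
      | some rule =>
          match PySem.List.index? tail other, PySem.List.index? tail this with
          | some jo, some jt =>
              if (PySem.Str.find rule this == 0) && decide (jt < jo) then innerB orders this tail more
              else some false
          | _, _ => none

-- outer loop 'for i in range(n - 1)' with tail = search_list[i:]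
def outerB (orders : List String) : List String → Option Bool
  | [] => some true
  | p :: rest =>
      match innerB orders p (p :: rest) rest with
      | some true => outerB orders rest
      | some false => some false
      | none => none

def array_search_alt (search_list : List String) (orders : List String) : Bool :=
  (outerB orders search_list).getD false

-- ===== PRECONDITION & SPEC =====
-- some order contains both page strings as substrings
def pvHasRule (orders : List String) (t o : String) : Bool :=
  orders.any (fun r => PySem.Str.isIn t r && PySem.Str.isIn o r)

-- the boolean value of one rule check: the first common order starts with t,
-- and o's first occurrence in the current suffix comes after t's
def pvCheck (orders : List String) (pages : List String) (t o : String) : Bool :=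
  match orders.find? (fun r => PySem.Str.isIn t r && PySem.Str.isIn o r),
        PySem.List.index? pages o, PySem.List.index? pages t with
  | some rule, some io, some it => (PySem.Str.find rule t == 0) && decide (it < io)
  | _, _, _ => false

def pvNth (sl : List String) (k : Nat) : String := sl.getD k ""

-- every check of round i is true (page i against each later page, with a common order)
def pvRoundTrueB (sl : List String) (orders : List String) (i : Nat) : Bool :=
  (sl.drop (i + 1)).all (fun o =>
    pvHasRule orders (pvNth sl i) o && pvCheck orders (sl.drop i) (pvNth sl i) o)

-- round i has a common order for each of its pairs
def pvRoundRuledB (sl : List String) (orders : List String) (i : Nat) : Bool :=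
  (sl.drop (i + 1)).all (fun o => pvHasRule orders (pvNth sl i) o)

-- Pre_ = exactly the inputs on which A returns (no exception): the list is nonempty and every
-- round the recursion reaches (all earlier rounds fully true) has a common order for each of its pairs.
def Pre_array_search (search_list : List String) (orders : List String) : Prop :=
  search_list ≠ [] ∧ ∀ i < search_list.length,
    (∀ i' < i, pvRoundTrueB search_list orders i' = true) →
    pvRoundRuledB search_list orders i = true

instance (search_list : List String) (orders : List String) : Decidable (Pre_array_search search_list orders) := by
  unfold Pre_array_search; infer_instance

def pvWitness_array_search : List String × List String := (["1", "2"], ["1|2"])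

def Spec_array_search (search_list : List String) (orders : List String) (out : Bool) : Prop := out = array_search_alt search_list orders
instance (search_list : List String) (orders : List String) (out : Bool) : Decidable (Spec_array_search search_list orders out) := by unfold Spec_array_search; infer_instance

-- ===== CLAIM (what is proved, stated in full; the proofs are below) =====
def Claim_equal_array_search : Prop := ∀ (search_list : List String) (orders : List String), Dom_array_search search_list orders → Pre_array_search search_list orders → Spec_array_search search_list orders (array_search search_list orders)

-- ===== LEMMAS AND PROOFS =====

-- canonical value of one of A's checks, the shape shared by pvCheck and by innerB's step
theorem checkRulesA_core (orders : List String) (p o : String) (pages : List String) :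
    checkRulesA p o pages (getRulesA p orders) =
      (match orders.find? (fun r => PySem.Str.isIn p r && PySem.Str.isIn o r),
             PySem.List.index? pages o, PySem.List.index? pages p with
       | some rule, some io, some it => some ((PySem.Str.find rule p == 0) && decide (it < io))
       | _, _, _ => none) := by
  unfold checkRulesA getRulesA
  cases hio : PySem.List.index? pages o <;> cases hit : PySem.List.index? pages p <;>
    cases hf : orders.find? (fun r => PySem.Str.isIn p r && PySem.Str.isIn o r) <;>
    simp only []
  · rw [List.head?_map, List.filter_filter,
        List.filter_congr (fun r _ => by cases PySem.Str.isIn p r <;> cases PySem.Str.isIn o r <;> rfl :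
          ∀ r ∈ orders, ((PySem.Str.isIn p r && PySem.Str.isIn o r) && PySem.Str.isIn p r) =
            (PySem.Str.isIn p r && PySem.Str.isIn o r)),
        List.head?_filter, hf]
    rfl
  · rw [List.head?_map, List.filter_filter,
        List.filter_congr (fun r _ => by cases PySem.Str.isIn p r <;> cases PySem.Str.isIn o r <;> rfl :
          ∀ r ∈ orders, ((PySem.Str.isIn p r && PySem.Str.isIn o r) && PySem.Str.isIn p r) =
            (PySem.Str.isIn p r && PySem.Str.isIn o r)),
        List.head?_filter, hf]
    simp only [Option.map_some]
    congr 1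
    rename_i io it rule
    congr 1
    rw [decide_eq_decide]; omega

-- B's inner loop computes the conjunction of A's round of checks (given none of them raises)
theorem innerB_eq (orders : List String) (p : String) (pages ros : List String)
    (h : ∀ o ∈ ros, (checkRulesA p o pages (getRulesA p orders)).isSome) :
    innerB orders p pages ros =
      some (ros.all (fun o => (checkRulesA p o pages (getRulesA p orders)).getD false)) := by
  induction ros with
  | nil => rfl
  | cons o more ih =>
    have ho := h o (by simp)
    rw [checkRulesA_core] at ho
    cases hf : orders.find? (fun r => PySem.Str.isIn p r && PySem.Str.isIn o r) with
    | none => rw [hf] at ho; simp at ho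
    | some rule =>
      rw [hf] at ho
      cases hio : PySem.List.index? pages o with
      | none => rw [hio] at ho; simp at ho
      | some io =>
        rw [hio] at ho
        cases hit : PySem.List.index? pages p with
        | none => rw [hit] at ho; simp at ho
        | some it =>
          simp only [innerB, hf, hio, hit, List.all_cons]
          rw [show checkRulesA p o pages (getRulesA p orders) =
                some ((PySem.Str.find rule p == 0) && decide (it < io)) from by
              rw [checkRulesA_core, hf, hio, hit]]
          simp only [Option.getD_some]
          by_cases hb : ((PySem.Str.find rule p == 0) && decide (it < io)) = true
          · rw [if_pos hb, ih (fun o ho' => h o (by simp [ho'])), hb, Bool.true_and]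
          · rw [if_neg hb, Bool.eq_false_iff.mpr hb, Bool.false_and]

-- wherever A returns a value, B returns the same value
theorem arrayA_eq_outerB (orders sl : List String) (b : Bool)
    (h : arrayA orders sl = some b) : outerB orders sl = some b := by
  induction sl with
  | nil => simp [arrayA] at h
  | cons p rest ih =>
    rw [arrayA] at h
    dsimp only at h
    by_cases he : rest.isEmpty
    · have hrest := List.isEmpty_iff.mp he
      subst hrest
      simp at h
      subst h
      rfl
    · rw [if_neg he] at h
      cases hn : (rest.map (fun o => checkRulesA p o (p :: rest) (getRulesA p orders))).any (·.isNone) with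
      | true => rw [hn, if_pos rfl] at h; exact absurd h (by simp)
      | false =>
        rw [hn, if_neg (by simp)] at h
        have hs : ∀ o ∈ rest, (checkRulesA p o (p :: rest) (getRulesA p orders)).isSome := by
          intro o ho
          have hmem := List.any_eq_false.mp hn _ (List.mem_map_of_mem ho)
          rw [Option.isSome_iff_ne_none]
          simpa using hmem
        have hinner := innerB_eq orders p (p :: rest) rest hs
        cases hc : (rest.map (fun o => checkRulesA p o (p :: rest) (getRulesA p orders))).contains (some false) with
        | true =>
          rw [hc, if_pos rfl] at h
          have hall : (rest.all (fun o => (checkRulesA p o (p :: rest) (getRulesA p orders)).getD false)) = false := by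
            obtain ⟨o, ho, hv⟩ := List.mem_map.mp (List.contains_iff_mem.mp hc)
            exact List.all_eq_false.mpr ⟨o, ho, by simp [hv]⟩
          rw [outerB, hinner, hall]
          simpa using h.symm
        | false =>
          rw [hc, if_neg (by simp)] at h
          have hall : (rest.all (fun o => (checkRulesA p o (p :: rest) (getRulesA p orders)).getD false)) = true := by
            apply List.all_eq_true.mpr
            intro o ho
            obtain ⟨v, hv⟩ := Option.isSome_iff_exists.mp (hs o ho)
            cases v with
            | true => simp [hv]
            | false =>
              have hctr := List.contains_iff_mem.mpr
                (List.mem_map.mpr ⟨o, ho, hv⟩ :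
                  some false ∈ rest.map (fun o => checkRulesA p o (p :: rest) (getRulesA p orders)))
              rw [hc] at hctr
              exact (Bool.false_ne_true hctr).elim
          rw [outerB, hinner, hall]
          exact ih h

theorem row0_ruled (p : String) (rest orders : List String) :
    pvRoundRuledB (p :: rest) orders 0 = rest.all (fun o => pvHasRule orders p o) := rfl

theorem row0_true (p : String) (rest orders : List String) :
    pvRoundTrueB (p :: rest) orders 0 =
      rest.all (fun o => pvHasRule orders p o && pvCheck orders (p :: rest) p o) := rfl

theorem ruled_shift (p : String) (rest orders : List String) (k : Nat) :
    pvRoundRuledB (p :: rest) orders (k + 1) = pvRoundRuledB rest orders k := rfl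

theorem true_shift (p : String) (rest orders : List String) (k : Nat) :
    pvRoundTrueB (p :: rest) orders (k + 1) = pvRoundTrueB rest orders k := rfl

-- a returned check value is pvCheck
theorem check_val (orders : List String) (p o : String) (pages : List String) (v : Bool)
    (h : checkRulesA p o pages (getRulesA p orders) = some v) :
    pvCheck orders pages p o = v := by
  rw [checkRulesA_core] at h
  unfold pvCheck
  cases hf : orders.find? (fun r => PySem.Str.isIn p r && PySem.Str.isIn o r) <;>
    cases hio : PySem.List.index? pages o <;> cases hit : PySem.List.index? pages p <;>
    rw [hf, hio, hit] at h <;> simp_all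

-- a common order makes A's check return a value
theorem check_some (orders : List String) (p o : String) (pages : List String)
    (ho : o ∈ pages) (hp : p ∈ pages) (hr : pvHasRule orders p o = true) :
    (checkRulesA p o pages (getRulesA p orders)).isSome := by
  rw [checkRulesA_core]
  have hr' : orders.any (fun r => PySem.Str.isIn p r && PySem.Str.isIn o r) = true := hr
  obtain ⟨rule, hrule⟩ := Option.isSome_iff_exists.mp
    (List.find?_isSome.mpr (List.any_eq_true.mp hr'))
  obtain ⟨io, hio⟩ := Option.isSome_iff_exists.mp ((PySem.List.index?_isSome_iff pages o).mpr ho)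
  obtain ⟨it, hit⟩ := Option.isSome_iff_exists.mp ((PySem.List.index?_isSome_iff pages p).mpr hp)
  rw [hrule, hio, hit]
  rfl

-- on Pre_ the recursion of A returns a value
theorem pre_isSome (sl orders : List String) (h : Pre_array_search sl orders) :
    (arrayA orders sl).isSome := by
  induction sl with
  | nil => exact absurd rfl h.1
  | cons p rest ih =>
    obtain ⟨-, hpre⟩ := h
    have hrule0 : pvRoundRuledB (p :: rest) orders 0 = true :=
      hpre 0 (by simp) (fun i' hi' => absurd hi' (by omega))
    have hr : ∀ o ∈ rest, pvHasRule orders p o = true := by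
      rw [row0_ruled] at hrule0
      exact fun o ho => List.all_eq_true.mp hrule0 o ho
    rw [arrayA]
    dsimp only
    by_cases he : rest.isEmpty
    · simp [he]
    · rw [if_neg he]
      have hs : ∀ o ∈ rest, (checkRulesA p o (p :: rest) (getRulesA p orders)).isSome :=
        fun o ho => check_some orders p o (p :: rest) (by simp [ho]) (by simp) (hr o ho)
      have hn : ((rest.map (fun o => checkRulesA p o (p :: rest) (getRulesA p orders))).any (·.isNone)) = false := by
        apply List.any_eq_false.mpr
        intro x hx
        obtain ⟨o, ho, rfl⟩ := List.mem_map.mp hx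
        intro hcon
        rw [Option.isNone_iff_eq_none] at hcon
        have hso := hs o ho
        rw [hcon] at hso
        exact absurd hso (by simp)
      rw [if_neg (by rw [hn]; exact Bool.false_ne_true)]
      cases hc : ((rest.map (fun o => checkRulesA p o (p :: rest) (getRulesA p orders))).contains (some false)) with
      | true => simp
      | false =>
        rw [if_neg Bool.false_ne_true]
        apply ih
        refine ⟨fun hnil => he (by rw [hnil]; rfl), ?_⟩
        intro i hi hchain
        have h0true : pvRoundTrueB (p :: rest) orders 0 = true := by
          rw [row0_true]
          apply List.all_eq_true.mpr
          intro o ho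
          obtain ⟨v, hv⟩ := Option.isSome_iff_exists.mp (hs o ho)
          cases v with
          | true => simp [hr o ho, check_val orders p o (p :: rest) true hv]
          | false =>
            have hctr := List.contains_iff_mem.mpr
              (List.mem_map.mpr ⟨o, ho, hv⟩ :
                some false ∈ rest.map (fun o => checkRulesA p o (p :: rest) (getRulesA p orders)))
            rw [hc] at hctr
            exact (Bool.false_ne_true hctr).elim
        have hstep := hpre (i + 1) (by simpa using Nat.succ_lt_succ hi)
          (fun i' hi' => by
            cases i' with
            | zero => exact h0true
            | succ k => rw [true_shift]; exact hchain k (by omega))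
        rw [ruled_shift] at hstep
        exact hstep

-- ===== VERDICT (by name: the statement is the Claim_ definition above) =====
theorem array_search_spec : Claim_equal_array_search := by
  intro sl orders _ hpre
  unfold Spec_array_search array_search array_search_alt
  obtain ⟨b, hb⟩ := Option.isSome_iff_exists.mp (pre_isSome sl orders hpre)
  rw [hb, arrayA_eq_outerB orders sl b hb]
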